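-- pv_equiv track=rewrite | github.com/qozochka/test | parser/view.py | show_parse_data
-- ===== SOURCE A (Python) =====
-- def show_parse_data(data: tuple) -> dict:
--     addresses_dict = {}
--     for item in data:
--         for num in range(len(item)):
--             if num not in addresses_dict.keys():
--                 addresses_dict[num] = []
--             addresses_dict[num].append(item[num])
--
--     return addresses_dict
-- ===== SOURCE B (Python) =====
-- def show_parse_data(data: tuple) -> dict:
--     if not data:
--         return {}
--     max_len = max(len(item) for item in data)
--     return {col: [item[col] for item in data if col < len(item)]
--             for col in range(max_len)}
-- ===== Notes on version B (the rewrite author's own statement) =====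
-- stated objective: alternative
-- what changed: B transposes column-major: it guards empty input, precomputes max_len = max row length, and builds each column 0..max_len-1 in one comprehension per column, instead of A's row-major loop that grows a dict entry-by-entry with membership tests.
import Mathlib
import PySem

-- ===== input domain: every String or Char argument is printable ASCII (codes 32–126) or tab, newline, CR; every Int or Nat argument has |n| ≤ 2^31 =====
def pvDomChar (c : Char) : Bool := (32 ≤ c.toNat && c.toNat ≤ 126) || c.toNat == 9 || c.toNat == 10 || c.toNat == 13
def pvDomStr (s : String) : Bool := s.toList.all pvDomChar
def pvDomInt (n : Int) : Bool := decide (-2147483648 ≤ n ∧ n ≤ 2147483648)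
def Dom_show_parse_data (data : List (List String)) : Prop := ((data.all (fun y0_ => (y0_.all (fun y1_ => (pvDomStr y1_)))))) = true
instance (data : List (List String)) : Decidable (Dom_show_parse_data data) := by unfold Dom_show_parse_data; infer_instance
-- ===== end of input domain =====

-- B builds the transpose column-major (guard empty, max row length, one comprehension per column)
-- instead of A's row-major dict-growing loop; equivalence of the return values is proved below.

-- ===== PORT A =====
def show_parse_data (data : List (List String)) : List (Int × List String) :=
  (data.foldl (fun addresses_dict item =>
      (PySem.List.pyRange 0 (item.length : Int)).foldl (fun d num =>
        let d' := if d.contains num then d else d.insert num ([] : List String)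
        d'.modify num [] (fun l => l ++ [PySem.List.pyGetD item num ""])) addresses_dict)
    PySem.Dict.empty).items

-- ===== PORT B =====
def show_parse_data_alt (data : List (List String)) : List (Int × List String) :=
  if data = [] then []
  else
    let maxLen : Int := (PySem.List.max? (data.map (fun item => (item.length : Int))) (fun y => y)).getD 0
    (PySem.List.pyRange 0 maxLen).map (fun col =>
      (col, (data.filter (fun item => col < (item.length : Int))).map
              (fun item => PySem.List.pyGetD item col "")))

-- ===== PRECONDITION & SPEC =====
def Spec_show_parse_data (data : List (List String)) (out : List (Int × List String)) : Prop := out = show_parse_data_alt data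
instance (data : List (List String)) (out : List (Int × List String)) : Decidable (Spec_show_parse_data data out) := by unfold Spec_show_parse_data; infer_instance

-- ===== CLAIM (what is proved, stated in full; the proofs are below) =====
def Claim_equal_show_parse_data : Prop := ∀ (data : List (List String)), Dom_show_parse_data data → Spec_show_parse_data data (show_parse_data data)

-- ===== LEMMAS AND PROOFS =====

-- maximum row length of the processed prefix
def pvM (p : List (List String)) : Nat := p.foldl (fun m it => max m it.length) 0
-- column c of the transpose of p
def pvCol (p : List (List String)) (c : Int) : List String :=
  (p.filter (fun it => c < (it.length : Int))).map (fun it => PySem.List.pyGetD it c "")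
-- canonical transpose
def pvCanon (p : List (List String)) : List (Int × List String) :=
  (List.range (pvM p)).map (fun c : Nat => ((c : Int), pvCol p (c : Int)))
-- A's inner-loop body
def pvG (item : List String) (d : PySem.Dict Int (List String)) (num : Int) : PySem.Dict Int (List String) :=
  (if d.contains num then d else d.insert num ([] : List String)).modify num []
    (fun l => l ++ [PySem.List.pyGetD item num ""])

theorem pv_cast_foldl_max (l : List (List String)) : ∀ a : Nat,
    (l.map (fun it => (it.length : Int))).foldl max (a : Int)
      = ((l.foldl (fun m it => max m it.length) a : Nat) : Int) := by
  induction l with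
  | nil => intro a; rfl
  | cons x xs ih => intro a; simp only [List.map_cons, List.foldl_cons, ← Nat.cast_max]; exact ih _

theorem pv_maxLen_eq (data : List (List String)) (h : data ≠ []) :
    (PySem.List.max? (data.map (fun it => (it.length : Int))) (fun y => y)).getD 0 = ((pvM data : Nat) : Int) := by
  match data with
  | it :: rest =>
    rw [List.map_cons, PySem.List.max?_id_cons, pv_cast_foldl_max]
    simp [pvM]

theorem pv_le_foldl_init (p : List (List String)) : ∀ a : Nat, a ≤ p.foldl (fun m it => max m it.length) a := by
  induction p with
  | nil => intro a; simp
  | cons x xs ih => intro a; exact le_trans (le_max_left _ _) (ih (max a x.length))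

theorem pv_mem_le_pvM (p : List (List String)) : ∀ (a : Nat) (it : List String), it ∈ p →
    it.length ≤ p.foldl (fun m it => max m it.length) a := by
  induction p with
  | nil => intro a it h; cases h
  | cons x xs ih =>
    intro a it h
    rcases List.mem_cons.mp h with rfl | h
    · exact le_trans (le_max_right _ _) (pv_le_foldl_init xs _)
    · exact ih _ it h

theorem pv_col_nil_of_ge (p : List (List String)) (c : Int) (h : ((pvM p : Nat) : Int) ≤ c) :
    pvCol p c = [] := by
  unfold pvCol
  rw [List.filter_eq_nil_iff.mpr, List.map_nil]
  intro it hit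
  have h2 : it.length ≤ pvM p := pv_mem_le_pvM p 0 it hit
  have h3 : ((it.length : Nat) : Int) ≤ ((pvM p : Nat) : Int) := by exact_mod_cast h2
  simp only [decide_eq_true_eq]
  omega

theorem pv_col_append (p : List (List String)) (it : List String) (c : Int) :
    pvCol (p ++ [it]) c = pvCol p c ++ (if c < (it.length : Int) then [PySem.List.pyGetD it c ""] else []) := by
  unfold pvCol
  rw [List.filter_append, List.map_append]
  congr 1
  by_cases h : c < (it.length : Int) <;> simp [h]

theorem pv_pvM_append (p : List (List String)) (it : List String) :
    pvM (p ++ [it]) = max (pvM p) it.length := by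
  simp [pvM, List.foldl_append]

theorem pv_find?_range (k : Nat) (g : Nat → List String) (n : Nat) :
    List.find? (fun p => p.1 == (n : Int)) ((List.range k).map (fun c : Nat => ((c : Int), g c)))
      = if n < k then some ((n : Int), g n) else none := by
  induction k with
  | zero => simp
  | succ k ih =>
    rw [List.range_succ, List.map_append, List.find?_append, ih]
    by_cases h : n < k
    · simp [h, Nat.lt_succ_of_lt h]
    · by_cases h2 : n = k
      · subst h2; simp [h]
      · have h3 : ¬ n < k + 1 := by omega
        have h4 : ¬ k = n := fun hh => h2 hh.symm
        simp [h, h3, h4]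

theorem pv_replace_range (k : Nat) (g : Nat → List String) (n : Nat) (newv : List String) :
    List.map (fun p => if p.1 == (n : Int) then ((n : Int), newv) else p)
        ((List.range k).map (fun c : Nat => ((c : Int), g c)))
      = (List.range k).map (fun c : Nat => ((c : Int), if c = n then newv else g c)) := by
  rw [List.map_map]
  apply List.map_congr_left
  intro c _
  by_cases h : c = n
  · subst h; simp
  · simp [h, fun hh => h (Int.natCast_inj.mp hh)]

theorem pv_any_range (k : Nat) (g : Nat → List String) (n : Nat) :
    ((List.range k).map (fun c : Nat => ((c : Int), g c))).any (fun p => p.1 == (n : Int)) = true ↔ n < k := by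
  simp [List.any_map, List.any_eq_true]

theorem pv_inner (item : List String) : ∀ (L m : Nat) (v : Nat → List String),
    (List.range L).foldl (fun d (n : Nat) => pvG item d (n : Int))
        (PySem.Dict.mk ((List.range m).map (fun c : Nat => ((c : Int), v c))))
      = PySem.Dict.mk ((List.range (max m L)).map (fun c : Nat => ((c : Int),
          if c < L then (if c < m then v c else []) ++ [PySem.List.pyGetD item (c : Int) ""] else v c))) := by
  intro L
  induction L with
  | zero =>
    intro m v
    simp only [List.range_zero, List.foldl_nil, Nat.max_zero]
    apply congrArg PySem.Dict.mk
    apply List.map_congr_left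
    intro c _
    simp
  | succ L ih =>
    intro m v
    rw [List.range_succ, List.foldl_append, ih m v, List.foldl_cons, List.foldl_nil]
    by_cases hm : L < m
    · -- key already present: no insert, modify replaces in place
      have ha : ((List.range (max m L)).map (fun c : Nat => ((c : Int),
          if c < L then (if c < m then v c else []) ++ [PySem.List.pyGetD item (c : Int) ""] else v c))).any
            (fun p => p.1 == (L : Int)) = true :=
        (pv_any_range _ _ _).mpr (by omega)
      unfold pvG PySem.Dict.modify PySem.Dict.getD PySem.Dict.get? PySem.Dict.insert PySem.Dict.contains
      rw [if_pos ha]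
      rw [pv_find?_range, if_pos (by omega : L < max m L)]
      rw [if_pos ha, pv_replace_range]
      apply congrArg PySem.Dict.mk
      rw [Nat.max_eq_left (Nat.le_of_lt hm), Nat.max_eq_left hm]
      apply List.map_congr_left
      intro c hcm
      rw [List.mem_range] at hcm
      by_cases hcl : c = L
      · subst hcl
        simp only [Option.map_some, Option.getD_some]
        rw [if_neg (by omega : ¬ c < c), if_pos (by omega : c < c + 1), if_pos hm]
        simp
      · rw [if_neg hcl]
        by_cases h1 : c < L
        · rw [if_pos h1, if_pos (by omega : c < L + 1)]
        · rw [if_neg h1, if_neg (by omega : ¬ c < L + 1)]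
    · -- new key: insert appends an empty column, modify fills it
      have ha : ¬ (((List.range (max m L)).map (fun c : Nat => ((c : Int),
          if c < L then (if c < m then v c else []) ++ [PySem.List.pyGetD item (c : Int) ""] else v c))).any
            (fun p => p.1 == (L : Int)) = true) := by
        intro hcon
        have := (pv_any_range (max m L) _ L).mp hcon
        omega
      have hb : (((List.range (max m L)).map (fun c : Nat => ((c : Int),
          if c < L then (if c < m then v c else []) ++ [PySem.List.pyGetD item (c : Int) ""] else v c))
            ++ [((L : Int), ([] : List String))]).any (fun p => p.1 == (L : Int))) = true := by
        rw [List.any_append]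
        simp
      unfold pvG PySem.Dict.modify PySem.Dict.getD PySem.Dict.get? PySem.Dict.insert PySem.Dict.contains
      rw [if_neg ha, if_neg ha]
      rw [if_pos hb]
      rw [List.find?_append, pv_find?_range, if_neg (by omega : ¬ L < max m L)]
      simp only [Option.orElse, List.find?_cons, List.find?_nil]
      rw [show (((L : Int), ([] : List String)).1 == (L : Int)) = true from by simp]
      simp only [Option.map_some]
      rw [List.map_append, pv_replace_range]
      apply congrArg PySem.Dict.mk
      rw [Nat.max_eq_right (Nat.le_of_not_lt hm), Nat.max_eq_right (by omega : m ≤ L + 1),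
        List.range_succ, List.map_append]
      congr 1
      · apply List.map_congr_left
        intro c hcm
        rw [List.mem_range] at hcm
        rw [if_neg (by omega : ¬ c = L), if_pos (by omega : c < L), if_pos (by omega : c < L + 1)]
      · simp only [List.map_cons, List.map_nil]
        rw [show (((L : Int), ([] : List String)).1 == (L : Int)) = true from by simp]
        simp only [if_pos]
        rw [if_pos (by omega : L < L + 1), if_neg (by omega : ¬ L < m)]
        simp

-- A's fold computes the canonical transpose
theorem pv_outer (data : List (List String)) :
    data.foldl (fun addresses_dict item =>
      (PySem.List.pyRange 0 (item.length : Int)).foldl (fun d num =>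
        let d' := if d.contains num then d else d.insert num ([] : List String)
        d'.modify num [] (fun l => l ++ [PySem.List.pyGetD item num ""])) addresses_dict)
      PySem.Dict.empty = PySem.Dict.mk (pvCanon data) := by
  induction data using List.reverseRecOn with
  | nil => rfl
  | append_singleton p it ih =>
    rw [List.foldl_append, ih, List.foldl_cons, List.foldl_nil]
    show (PySem.List.pyRange 0 (it.length : Int)).foldl (pvG it) (PySem.Dict.mk (pvCanon p)) = _
    rw [PySem.List.pyRange_zero, List.foldl_map, Int.toNat_natCast]
    unfold pvCanon
    rw [pv_inner it it.length (pvM p) (fun c : Nat => pvCol p (c : Int)), pv_pvM_append]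
    congr 1
    apply List.map_congr_left
    intro c hc
    rw [List.mem_range] at hc
    rw [pv_col_append]
    congr 1
    by_cases h : c < it.length
    · have h' : (c : Int) < (it.length : Int) := by exact_mod_cast h
      simp only [h, if_true, h', if_true]
      by_cases h2 : c < pvM p
      · simp [h2]
      · rw [if_neg h2, pv_col_nil_of_ge p (c : Int) (by exact_mod_cast Nat.le_of_not_lt h2)]
    · have h' : ¬ (c : Int) < (it.length : Int) := by exact_mod_cast h
      simp [h, h']

theorem pv_alt_eq_canon (data : List (List String)) : show_parse_data_alt data = pvCanon data := by
  by_cases h : data = []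
  · subst h; rfl
  · unfold show_parse_data_alt
    rw [if_neg h]
    simp only [pv_maxLen_eq data h, PySem.List.pyRange_zero, List.map_map, Int.toNat_natCast]
    rfl

-- ===== VERDICT (by name: the statement is the Claim_ definition above) =====
theorem show_parse_data_spec : Claim_equal_show_parse_data := by
  intro data _
  unfold Spec_show_parse_data
  rw [pv_alt_eq_canon]
  show (PySem.Dict.items _) = _
  rw [pv_outer]
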